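-- pv_equiv track=rewrite | github.com/vipinsaini27/DSAlgo | Day 4 - Introduction to Problem Solving/Elements which have at-least two greater elements.py | solve
-- ===== SOURCE A (Python) =====
-- def solve(A):
--     result = []
--     for i in A:
--         count = 0
--         for j in A:
--             if j > i:
--                 count += 1
--             if count == 2:
--                 result.append(i)
--                 break
--
--     return result
-- ===== SOURCE B (Python) =====
-- def solve(A):
--     # Single pass tracking the two largest values (with duplicates); an element
--     # has at least two strictly greater elements iff it is below the second max.
--     if len(A) < 2:
--         return []
--     if A[0] >= A[1]:
--         m1, m2 = A[0], A[1]
--     else: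
--         m1, m2 = A[1], A[0]
--     for x in A[2:]:
--         if x > m1:
--             m1, m2 = x, m1
--         elif x > m2:
--             m2 = x
--     return [x for x in A if x < m2]
-- ===== Notes on version B (the rewrite author's own statement) =====
-- stated objective: faster
-- what changed: Replaces the quadratic nested count loop by a single pass that tracks the two largest values (with duplicates) and then filters the list by 'x < second max'.
import Mathlib
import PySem

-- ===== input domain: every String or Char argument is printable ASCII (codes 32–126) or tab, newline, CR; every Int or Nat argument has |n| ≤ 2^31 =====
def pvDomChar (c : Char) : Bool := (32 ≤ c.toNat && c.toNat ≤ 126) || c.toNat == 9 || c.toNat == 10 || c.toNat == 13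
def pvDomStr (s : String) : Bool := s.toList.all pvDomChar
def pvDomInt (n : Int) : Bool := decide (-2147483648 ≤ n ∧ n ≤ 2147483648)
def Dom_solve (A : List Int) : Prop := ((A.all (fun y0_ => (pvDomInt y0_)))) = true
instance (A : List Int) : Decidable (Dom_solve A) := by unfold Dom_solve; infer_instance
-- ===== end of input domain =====

-- B replaces A's quadratic nested count loop by one pass tracking the two largest
-- values, then filters by 'x < second max' (objective: faster, asymptotic).

-- ===== PORT A =====
-- inner 'for j in A' loop: count elements j > i, return true (append + break) when count hits 2
def solveInner (i : Int) (count : Int) : List Int → Bool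
  | [] => false
  | j :: rest =>
    let count' := if i < j then count + 1 else count
    if count' = 2 then true else solveInner i count' rest

def solve (A : List Int) : List Int :=
  A.foldl (fun result i => if solveInner i 0 A then result ++ [i] else result) []

-- ===== PORT B =====
def solveStep (p : Int × Int) (x : Int) : Int × Int :=
  if x > p.1 then (x, p.1) else if x > p.2 then (p.1, x) else p

def solve_alt (A : List Int) : List Int :=
  match A with
  | [] => []
  | [_] => []
  | a :: b :: rest =>
    let p0 := if a ≥ b then (a, b) else (b, a)
    let p := rest.foldl solveStep p0
    A.filter (fun x => decide (x < p.2))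

-- ===== PRECONDITION & SPEC =====
def Spec_solve (A : List Int) (out : List Int) : Prop := out = solve_alt A
instance (A : List Int) (out : List Int) : Decidable (Spec_solve A out) := by unfold Spec_solve; infer_instance

-- ===== CLAIM (what is proved, stated in full; the proofs are below) =====
def Claim_equal_solve : Prop := ∀ (A : List Int), Dom_solve A → Spec_solve A (solve A)

-- ===== LEMMAS AND PROOFS =====

-- number of elements of L strictly greater than x
def cntGt (x : Int) (L : List Int) : Nat := L.countP (fun j => decide (x < j))

lemma cntGt_append (x : Int) (L M : List Int) :
    cntGt x (L ++ M) = cntGt x L + cntGt x M := List.countP_append ..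

lemma cntGt_singleton (x y : Int) :
    cntGt x [y] = if x < y then 1 else 0 := by
  simp [cntGt, List.countP_cons]

-- A's inner loop returns true iff at least two strictly greater elements remain (given count so far)
lemma solveInner_iff (i : Int) (L : List Int) :
    ∀ c : Int, 0 ≤ c → c ≤ 1 →
      (solveInner i c L = true ↔ 2 ≤ c + (cntGt i L : Int)) := by
  induction L with
  | nil => intro c h0 h1; simp [solveInner, cntGt]; omega
  | cons j rest ih =>
    intro c h0 h1
    have hc : cntGt i (j :: rest) = (if i < j then 1 else 0) + cntGt i rest := by
      simp [cntGt, List.countP_cons]; split_ifs <;> omega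
    by_cases hij : i < j
    · simp only [solveInner, hij, if_pos, hc]
      by_cases h2 : c + 1 = 2
      · simp [h2]; omega
      · rw [if_neg h2, ih (c+1) (by omega) (by omega)]
        push_cast; constructor <;> intro <;> omega
    · simp only [solveInner, hij, if_false, hc]
      have h2 : ¬ (c = 2) := by omega
      rw [if_neg h2, ih c h0 h1]
      push_cast; simp

-- invariant of B's two-maxima pass
def TwoMaxInv (L : List Int) (p : Int × Int) : Prop :=
  p.2 ≤ p.1 ∧ ∀ x : Int, (1 ≤ cntGt x L ↔ x < p.1) ∧ (2 ≤ cntGt x L ↔ x < p.2)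

lemma solveStep_inv (L : List Int) (p : Int × Int) (y : Int) (h : TwoMaxInv L p) :
    TwoMaxInv (L ++ [y]) (solveStep p y) := by
  obtain ⟨hle, hiff⟩ := h
  unfold TwoMaxInv solveStep
  split_ifs with h1 h2 <;>
  · refine ⟨by (try dsimp only); omega, fun x => ?_⟩
    have hx1 := (hiff x).1
    have hx2 := (hiff x).2
    rw [cntGt_append, cntGt_singleton]
    try dsimp only
    by_cases hp2 : x < p.2
    · have hp1 : x < p.1 := lt_of_lt_of_le hp2 hle
      have c1 := hx1.mpr hp1
      have c2 := hx2.mpr hp2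
      split_ifs with hxy <;> omega
    · have hn2 : ¬ 2 ≤ cntGt x L := fun hcc => hp2 (hx2.mp hcc)
      by_cases hp1 : x < p.1
      · have c1 := hx1.mpr hp1
        split_ifs with hxy <;> omega
      · have hn1 : ¬ 1 ≤ cntGt x L := fun hcc => hp1 (hx1.mp hcc)
        split_ifs with hxy <;> omega

lemma foldl_solveStep_inv (rest : List Int) :
    ∀ (L : List Int) (p : Int × Int), TwoMaxInv L p →
      TwoMaxInv (L ++ rest) (rest.foldl solveStep p) := by
  induction rest with
  | nil => intro L p h; simpa using h
  | cons y t ih =>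
    intro L p h
    have := ih (L ++ [y]) (solveStep p y) (solveStep_inv L p y h)
    simpa [List.append_assoc] using this

lemma twoMaxInv_init (a b : Int) :
    TwoMaxInv [a, b] (if a ≥ b then (a, b) else (b, a)) := by
  have hc : ∀ x : Int, cntGt x [a, b] =
      (if x < a then 1 else 0) + (if x < b then 1 else 0) := by
    intro x; simp [cntGt, List.countP_cons]; split_ifs <;> omega
  split_ifs with hab <;>
  · refine ⟨by simp; omega, fun x => ?_⟩
    rw [hc x]
    by_cases hxa : x < a <;> by_cases hxb : x < b <;>
      simp [hxa, hxb]; omega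

-- ===== VERDICT (by name: the statement is the Claim_ definition above) =====
theorem solve_spec : Claim_equal_solve := by
  intro A _
  unfold Spec_solve
  match A with
  | [] => rfl
  | [a] => simp [solve, solve_alt, solveInner]
  | a :: b :: rest =>
    have hinv : TwoMaxInv (a :: b :: rest) (rest.foldl solveStep
        (if a ≥ b then (a, b) else (b, a))) := by
      have := foldl_solveStep_inv rest [a, b] _ (twoMaxInv_init a b)
      simpa using this
    show (a :: b :: rest).foldl
        (fun result i => if solveInner i 0 (a :: b :: rest) then result ++ [i] else result) []
      = solve_alt (a :: b :: rest)
    rw [PySem.List.foldl_append_if_eq_filter]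
    show [] ++ _ = _
    rw [List.nil_append]
    unfold solve_alt
    apply List.filter_congr
    intro x _
    have h1 := (solveInner_iff x (a :: b :: rest) 0 (by omega) (by omega))
    have h2 := (hinv.2 x).2
    simp only [Int.zero_add] at h1
    by_cases hx : x < (rest.foldl solveStep (if a ≥ b then (a, b) else (b, a))).2
    · simp only [hx, decide_true]
      rw [h1]; exact_mod_cast h2.mpr hx
    · have hn : ¬ (2 ≤ (cntGt x (a :: b :: rest) : Int)) := by
        intro h; exact hx (h2.mp (by exact_mod_cast h))
      simp only [hx, decide_false]
      rw [← Bool.not_eq_true, h1]; exact hn
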